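-- pv_equiv track=rewrite | github.com/kuzuri137/digital-id-auth | postprocess.py | extract_group
-- ===== SOURCE A (Python) =====
-- def extract_group(text):  # regular expression for blood group
--     text = " ".join(text.split("\n")).split(" ")
--     group = ""
--     for words in text:
--         all_groups = ["A+", "A-", "B+", "B-", "O+", "O-", "AB+", "AB-"]
--         if words in all_groups:
--             group = words
--             break
--     return group
-- ===== SOURCE B (Python) =====
-- def extract_group(text):
--     GROUPS = {"A+", "A-", "B+", "B-", "O+", "O-", "AB+", "AB-"}
--     cur = []
--     for ch in text + "\n":
--         if ch == " " or ch == "\n":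
--             tok = "".join(cur)
--             if tok in GROUPS:
--                 return tok
--             cur = []
--         else:
--             cur.append(ch)
--     return ""
-- ===== Notes on version B (the rewrite author's own statement) =====
-- stated objective: simpler
-- what changed: Replaces the split-on-newline, join, split-on-space pipeline plus a token-list loop with a single left-to-right character scan that flushes the current token at each delimiter or at the end and returns the first token that is a blood group.
import Mathlib
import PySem

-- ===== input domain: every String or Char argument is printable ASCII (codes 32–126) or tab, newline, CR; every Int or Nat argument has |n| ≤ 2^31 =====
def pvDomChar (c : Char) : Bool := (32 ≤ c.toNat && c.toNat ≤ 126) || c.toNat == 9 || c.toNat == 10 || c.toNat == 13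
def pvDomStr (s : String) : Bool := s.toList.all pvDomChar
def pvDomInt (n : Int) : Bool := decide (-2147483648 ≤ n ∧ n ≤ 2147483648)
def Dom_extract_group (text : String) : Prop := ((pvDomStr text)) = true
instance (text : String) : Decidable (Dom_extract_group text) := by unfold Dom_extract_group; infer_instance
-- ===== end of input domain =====

-- B replaces split("\n")/join/split(" ") plus a token-list loop by one character scan; objective: simpler.

-- ===== PORT A =====
def groupStrs : List String := ["A+", "A-", "B+", "B-", "O+", "O-", "AB+", "AB-"]

-- the 'for words in text: … break' loop: first token in groupStrs, else the initial ""
def loopA : List String → String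
  | [] => ""
  | w :: ws => if w ∈ groupStrs then w else loopA ws

-- separators "\n" and " " are non-empty literals, so Python's split never raises: split? is
-- `some` there and .getD [] only unwraps it
def extract_group (text : String) : String :=
  loopA ((PySem.Str.split? (PySem.Str.join " " ((PySem.Str.split? text "\n").getD [])) " ").getD [])

-- ===== PORT B =====
def groupToks : List (List Char) :=
  [['A','+'], ['A','-'], ['B','+'], ['B','-'], ['O','+'], ['O','-'], ['A','B','+'], ['A','B','-']]

-- Source B's for-loop: flush the current token at ' '/'\n', return it if it is a blood group
def scanB : List Char → List Char → List Char
  | [], _ => []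
  | c :: cs, cur =>
      if c = ' ' ∨ c = '\n' then (if cur ∈ groupToks then cur else scanB cs [])
      else scanB cs (cur ++ [c])

def extract_group_alt (text : String) : String :=
  String.ofList (scanB (text.toList ++ ['\n']) [])

-- ===== PRECONDITION & SPEC =====
def Spec_extract_group (text : String) (out : String) : Prop := out = extract_group_alt text
instance (text : String) (out : String) : Decidable (Spec_extract_group text out) := by unfold Spec_extract_group; infer_instance

-- ===== CLAIM (what is proved, stated in full; the proofs are below) =====
def Claim_equal_extract_group : Prop := ∀ (text : String), Dom_extract_group text → Spec_extract_group text (extract_group text)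

-- ===== LEMMAS AND PROOFS =====

-- simple structural tokenizer on one delimiter (proof-only characterisation of Chars.splitOn)
def tok (d : Char) : List Char → List (List Char)
  | [] => [[]]
  | c :: cs => if c = d then [] :: tok d cs else (tok d cs).modifyHead (c :: ·)

lemma tok_ne_nil (d : Char) (l : List Char) : tok d l ≠ [] := by
  induction l with
  | nil => simp [tok]
  | cons c cs ih =>
      simp only [tok]
      split
      · simp
      · cases h : tok d cs with
        | nil => exact absurd h ih
        | cons a t => simp

lemma modifyHead_fun_id {α : Type} (l : List α) : List.modifyHead (fun x => x) l = l := by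
  cases l <;> rfl

lemma splitOn_go_eq (d : Char) :
    ∀ (l : List Char) (fuel : Nat), l.length ≤ fuel → ∀ (cur : List Char) (acc : List (List Char)),
      PySem.Chars.splitOn.go [d] fuel l cur acc
        = acc.reverse ++ (tok d l).modifyHead (cur.reverse ++ ·) := by
  intro l
  induction l with
  | nil =>
      intro fuel _ cur acc
      cases fuel <;> simp [PySem.Chars.splitOn.go, tok]
  | cons c cs ih =>
      intro fuel hf cur acc
      cases fuel with
      | zero => simp at hf
      | succ f =>
          simp only [PySem.Chars.splitOn.go]
          by_cases hc : c = d
          · subst hc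
            have hpre : List.isPrefixOf [c] (c :: cs) = true := by
              simp [List.isPrefixOf]
            rw [if_pos hpre]
            have hcs : cs.length ≤ f := by simp at hf; omega
            have := ih f hcs [] (cur.reverse :: acc)
            simp only [List.length_singleton, List.drop_one, List.tail_cons] at this ⊢
            rw [this]
            simp [tok, modifyHead_fun_id]
          · have hpre : List.isPrefixOf [d] (c :: cs) = false := by
              simp [List.isPrefixOf]
              exact fun h => absurd h.symm hc
            rw [if_neg (by simp [hpre])]
            rw [ih f (by simp at hf; omega) (c :: cur) acc]
            simp only [tok, if_neg hc]
            rw [List.modifyHead_modifyHead]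
            congr 1
            cases htc : tok d cs with
            | nil => exact absurd htc (tok_ne_nil d cs)
            | cons a t => simp

lemma splitOn_eq_tok (d : Char) (l : List Char) :
    PySem.Chars.splitOn l [d] = tok d l := by
  rw [PySem.Chars.splitOn, splitOn_go_eq d l (l.length + 1) (by omega) [] []]
  simp [modifyHead_fun_id]

def nlToSp (c : Char) : Char := if c = '\n' then ' ' else c

lemma join_tok (l : List Char) :
    PySem.Chars.join [' '] (tok '\n' l) = l.map nlToSp := by
  induction l with
  | nil => simp [tok, PySem.Chars.join, List.intercalate]
  | cons c cs ih =>
      simp only [tok, List.map_cons]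
      by_cases hc : c = '\n'
      · subst hc
        rw [if_pos rfl]
        cases htc : tok '\n' cs with
        | nil => exact absurd htc (tok_ne_nil _ _)
        | cons a t =>
            rw [htc] at ih
            rw [PySem.Chars.join_cons_cons, ih]
            simp [nlToSp]
      · rw [if_neg hc]
        cases htc : tok '\n' cs with
        | nil => exact absurd htc (tok_ne_nil _ _)
        | cons a t =>
            rw [htc] at ih
            simp only [List.modifyHead_cons]
            have hns : nlToSp c = c := by simp [nlToSp, hc]
            cases t with
            | nil =>
                simp only [PySem.Chars.join_singleton] at ih
                simp [PySem.Chars.join_singleton, ih, hns]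
            | cons b ts =>
                rw [PySem.Chars.join_cons_cons] at ih
                rw [PySem.Chars.join_cons_cons, hns, ← ih]
                simp

-- tokens when splitting the '\n'→' ' image on ' ' = splitting the original on both delimiters
def tok2 : List Char → List (List Char)
  | [] => [[]]
  | c :: cs => if c = ' ' ∨ c = '\n' then [] :: tok2 cs else (tok2 cs).modifyHead (c :: ·)

lemma tok_map_eq_tok2 (l : List Char) : tok ' ' (l.map nlToSp) = tok2 l := by
  induction l with
  | nil => simp [tok, tok2]
  | cons c cs ih =>
      simp only [List.map_cons, tok, tok2]
      by_cases h : c = ' ' ∨ c = '\n'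
      · have : nlToSp c = ' ' := by
          rcases h with h | h <;> simp [nlToSp, h]
        rw [this, if_pos rfl, if_pos h, ih]
      · have hne : nlToSp c = c := by
          simp [nlToSp]; intro hc; exact absurd (Or.inr hc) h
        rw [hne, if_neg (fun hc => h (Or.inl hc)), if_neg h, ih]

def tok2_ne_nil (l : List Char) : tok2 l ≠ [] := by
  induction l with
  | nil => simp [tok2]
  | cons c cs ih =>
      simp only [tok2]
      split
      · simp
      · cases h : tok2 cs with
        | nil => exact absurd h ih
        | cons a t => simp

-- char-level mirror of A's token loop
def loopAC : List (List Char) → List Char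
  | [] => []
  | w :: ws => if w ∈ groupToks then w else loopAC ws

lemma scanB_eq (l : List Char) :
    ∀ cur, scanB (l ++ ['\n']) cur = loopAC ((tok2 l).modifyHead (cur ++ ·)) := by
  induction l with
  | nil =>
      intro cur
      simp [scanB, tok2, loopAC]
  | cons c cs ih =>
      intro cur
      simp only [List.cons_append, scanB, tok2]
      by_cases h : c = ' ' ∨ c = '\n'
      · rw [if_pos h, if_pos h]
        simp only [List.modifyHead_cons, List.append_nil, loopAC]
        rw [ih []]
        simp [modifyHead_fun_id]
      · rw [if_neg h, if_neg h, ih (cur ++ [c]), List.modifyHead_modifyHead]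
        congr 2
        funext x
        simp [List.append_assoc]

lemma loopA_map (ts : List (List Char)) :
    loopA (ts.map String.ofList) = String.ofList (loopAC ts) := by
  induction ts with
  | nil => rfl
  | cons w ws ih =>
      simp only [List.map_cons, loopA, loopAC]
      have hinj : Function.Injective String.ofList := by
        intro a b hab
        have := congrArg String.toList hab
        simpa using this
      have hmem : (String.ofList w ∈ groupStrs) ↔ (w ∈ groupToks) := by
        have hg : groupStrs = groupToks.map String.ofList := by rfl
        rw [hg]
        exact List.mem_map_of_injective hinj
      by_cases h : w ∈ groupToks
      · rw [if_pos (hmem.mpr h), if_pos h]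
      · rw [if_neg (fun hh => h (hmem.mp hh)), if_neg h, ih]

lemma split?_getD (s : String) (d : Char) (hd : d.toString.toList = [d]) :
    ((PySem.Str.split? s d.toString).getD []).map String.toList = tok d s.toList := by
  have h := PySem.Str.split?_map s d.toString
  rw [hd] at h
  cases hs : PySem.Str.split? s d.toString with
  | none => rw [hs] at h; simp [PySem.Chars.split?] at h
  | some v =>
      rw [hs] at h
      simp [PySem.Chars.split?] at h
      simp [h, splitOn_eq_tok]

-- ===== VERDICT (by name: the statement is the Claim_ definition above) =====
theorem extract_group_spec : Claim_equal_extract_group := by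
  intro text _
  unfold Spec_extract_group extract_group extract_group_alt
  have h1 : ((PySem.Str.split? text "\n").getD []).map String.toList = tok '\n' text.toList :=
    split?_getD text '\n' rfl
  have hmap : (PySem.Str.split? text "\n").getD []
      = (tok '\n' text.toList).map String.ofList := by
    rw [← h1, List.map_map]
    have : String.ofList ∘ String.toList = id := by
      funext s; simp
    simp [this]
  rw [hmap]
  have hjoin : PySem.Str.join " " ((tok '\n' text.toList).map String.ofList)
      = String.ofList (text.toList.map nlToSp) := by
    rw [PySem.Str.join]
    congr 1
    rw [List.map_map]
    have : String.toList ∘ String.ofList = id := by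
      funext l; simp
    rw [this, List.map_id, ← join_tok]
    rfl
  rw [hjoin]
  have h2 : ((PySem.Str.split? (String.ofList (text.toList.map nlToSp)) " ").getD []).map String.toList
      = tok ' ' (text.toList.map nlToSp) := by
    have := split?_getD (String.ofList (text.toList.map nlToSp)) ' ' rfl
    simpa using this
  have hmap2 : (PySem.Str.split? (String.ofList (text.toList.map nlToSp)) " ").getD []
      = (tok2 text.toList).map String.ofList := by
    rw [← tok_map_eq_tok2, ← h2, List.map_map]
    have : String.ofList ∘ String.toList = id := by
      funext s; simp
    simp [this]
  rw [hmap2, loopA_map, scanB_eq text.toList []]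
  congr 1
  cases ht : tok2 text.toList with
  | nil => exact absurd ht (tok2_ne_nil _)
  | cons a t => simp
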